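-- pv_equiv track=rewrite | github.com/TheTopLuca/leftRecurstionLeftFactoringElimination | task_4_1.py | eliminateImmediateLeftRecursion
-- ===== SOURCE A (Python) =====
-- def calculateAlphas(char , arrayOfStrings ):
--     alphas = []
--     index = len(char)
--     for string in arrayOfStrings:
--         i = 0
--         bool = True
--         while (i<index):
--             if(len(char)>len(string)):
--                 bool = False
--                 break
--             if(not char[i]== string[i]):
--                 bool = False
--                 break
--             if(char[i] == string[i]):
--                 i+=1
--         if(bool):
--             alphas.append(string[index:len(string)])
--     return  alphas
--
-- def calculateBetas(char , arrayOfStrings):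
--     betas = []
--     index = len(char)
--     for string in arrayOfStrings:
--         i = 0
--         bool = True
--         if(len(char)> len(string)):
--             bool = True
--         if(char == string[0:index]):
--             bool = False
--         if(bool):
--             betas.append(string)
--     return  betas
--
-- def eliminateImmediateLeftRecursion(char ,setOfRules):
--     output = dict()
--     alphas = calculateAlphas(char,setOfRules)
--     if(len(alphas)==0):
--         output.update({char:setOfRules})
--         return output
--
--     betas = calculateBetas(char,setOfRules)
--     originalRuleModified = []
--     newCharacterNewRules = []
--     newDashedChar = char + "'"
--     for rule in betas :
--         originalRuleModified.append(rule+ newDashedChar)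
--     for rule in alphas :
--         newCharacterNewRules.append(rule + newDashedChar)
--     newCharacterNewRules.append("epsilon")
--     output.update({char : originalRuleModified} )
--     output.update({newDashedChar : newCharacterNewRules})
--     return  output
-- ===== SOURCE B (Python) =====
-- def eliminateImmediateLeftRecursion(char, setOfRules):
--     # Early case: no rule has char as a prefix.
--     if not any(rule.startswith(char) for rule in setOfRules):
--         return {char: setOfRules}
--     dashed = char + "'"
--     # One backwards pass that builds the two FINAL suffixed rule lists directly
--     # (no intermediate alphas/betas); "epsilon" is seeded before the pass.
--     orig, new = [], ["epsilon"]
--     for r in reversed(setOfRules):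
--         if r.startswith(char):
--             new = [r[len(char):] + dashed] + new
--         else:
--             orig = [r + dashed] + orig
--     return {char: orig, dashed: new}
-- ===== Notes on version B (the rewrite author's own statement) =====
-- stated objective: alternative
-- what changed: Instead of A's staged pipeline (two separate prefix-scanning helpers producing alphas/betas, then two rewrite loops), B does an any() scan for the early-return case and then a single backwards pass that builds both final suffixed rule lists directly back-to-front, seeding 'epsilon' before the pass, with no intermediate alphas/betas lists.
import Mathlib
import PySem

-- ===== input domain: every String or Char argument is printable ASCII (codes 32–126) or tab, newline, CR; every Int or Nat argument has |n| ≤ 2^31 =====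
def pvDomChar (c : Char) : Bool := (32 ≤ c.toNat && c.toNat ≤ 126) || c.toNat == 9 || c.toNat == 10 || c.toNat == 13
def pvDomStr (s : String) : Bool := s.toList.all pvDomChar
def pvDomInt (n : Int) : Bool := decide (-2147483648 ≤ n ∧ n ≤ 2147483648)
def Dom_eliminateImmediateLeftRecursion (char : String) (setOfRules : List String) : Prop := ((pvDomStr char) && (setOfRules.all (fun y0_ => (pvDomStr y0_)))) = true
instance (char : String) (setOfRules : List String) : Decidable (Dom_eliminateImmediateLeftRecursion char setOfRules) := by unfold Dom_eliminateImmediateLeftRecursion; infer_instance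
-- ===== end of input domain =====

-- B replaces A's staged pipeline (two prefix-scanning helpers producing alphas/betas, then two rewrite
-- loops) by an any() scan plus ONE backwards pass (ported as the structural recursion pvGoB)
-- building both final suffixed rule lists directly, with "epsilon" seeded first; objective: alternative decomposition, same cost.
-- Both Pythons return dicts whose keys (char, char + "'") are always distinct, ported as assoc lists in
-- insertion order; strings are concatenated as List Char and rebuilt with String.ofList (exact).

-- ===== PORT A =====
-- inner while-loop of calculateAlphas: i counts up while i < len(char);
-- both reads char[i]/string[i] are in range whenever evaluated, so getD is exact here.
def pvWhileA (cs ss : List Char) (i : Nat) : Bool :=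
  if i < cs.length then
    if cs.length > ss.length then false
    else if ¬ (cs.getD i ' ' == ss.getD i ' ') then false
    else pvWhileA cs ss (i + 1)
  else true
termination_by cs.length - i

def pvCalcAlphas (cs : List Char) (arr : List (List Char)) : List (List Char) :=
  -- string[index:len(string)] with index = len(char) ≥ 0 is drop
  arr.foldl (fun alphas s => if pvWhileA cs s 0 then alphas ++ [s.drop cs.length] else alphas) []

def pvCalcBetas (cs : List Char) (arr : List (List Char)) : List (List Char) :=
  arr.foldl (fun betas s =>
    -- bool = True; if len(char) > len(string): bool = True  (kept as written, a no-op)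
    let b := true
    let b := if cs.length > s.length then true else b
    -- string[0:index] with index = len(char) ≥ 0 is take
    let b := if cs == s.take cs.length then false else b
    if b then betas ++ [s] else betas) []

def eliminateImmediateLeftRecursion (char : String) (setOfRules : List String) : List (String × List String) :=
  let cs := char.toList
  let alphas := pvCalcAlphas cs (setOfRules.map (·.toList))
  if alphas.length = 0 then
    [(char, setOfRules)]   -- dict with the single key char
  else
    let betas := pvCalcBetas cs (setOfRules.map (·.toList))
    let newDashedChar := cs ++ ['\'']
    let originalRuleModified := betas.foldl (fun acc rule => acc ++ [String.ofList (rule ++ newDashedChar)]) []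
    let newCharacterNewRules := (alphas.foldl (fun acc rule => acc ++ [String.ofList (rule ++ newDashedChar)]) []) ++ ["epsilon"]
    -- the two keys always differ (their lengths differ), so the dict's items are exactly this list
    [(char, originalRuleModified), (String.ofList newDashedChar, newCharacterNewRules)]

-- ===== PORT B =====
-- B's backwards pass over the rules (a reversed loop prepending = structural recursion from the right):
-- returns the two FINAL suffixed rule lists, epsilon seeded at the end of the list
def pvGoB (cs dashed : List Char) : List String → List String × List String
  | [] => ([], ["epsilon"])
  | r :: rest =>
    let (orig, nw) := pvGoB cs dashed rest
    let rc := r.toList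
    if PySem.Chars.startswith rc cs then
      (orig, String.ofList (rc.drop cs.length ++ dashed) :: nw)
    else
      (String.ofList (rc ++ dashed) :: orig, nw)

def eliminateImmediateLeftRecursion_alt (char : String) (setOfRules : List String) : List (String × List String) :=
  let cs := char.toList
  if ¬ (setOfRules.any (fun r => PySem.Chars.startswith r.toList cs)) then
    [(char, setOfRules)]
  else
    let dashed := cs ++ ['\'']
    let (orig, nw) := pvGoB cs dashed setOfRules
    [(char, orig), (String.ofList dashed, nw)]

-- ===== PRECONDITION & SPEC =====
def Spec_eliminateImmediateLeftRecursion (char : String) (setOfRules : List String) (out : List (String × List String)) : Prop := out = eliminateImmediateLeftRecursion_alt char setOfRules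
instance (char : String) (setOfRules : List String) (out : List (String × List String)) : Decidable (Spec_eliminateImmediateLeftRecursion char setOfRules out) := by unfold Spec_eliminateImmediateLeftRecursion; infer_instance

-- ===== CLAIM (what is proved, stated in full; the proofs are below) =====
def Claim_equal_eliminateImmediateLeftRecursion : Prop := ∀ (char : String) (setOfRules : List String), Dom_eliminateImmediateLeftRecursion char setOfRules → Spec_eliminateImmediateLeftRecursion char setOfRules (eliminateImmediateLeftRecursion char setOfRules)

-- ===== LEMMAS AND PROOFS =====

-- A's inner while-loop from position i (first i characters known equal) decides "cs is a prefix of ss"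
theorem pvWhileA_eq (cs ss : List Char) (i : Nat) (hi : i ≤ cs.length)
    (hlen : i ≠ 0 → cs.length ≤ ss.length)
    (hagree : ∀ j, j < i → cs.getD j ' ' = ss.getD j ' ') :
    pvWhileA cs ss i = decide (cs <+: ss) := by
  rw [pvWhileA]
  by_cases h : i < cs.length
  · rw [if_pos h]
    by_cases hl : cs.length > ss.length
    · rw [if_pos hl]
      symm; simp only [decide_eq_false_iff_not]
      intro hp; exact absurd hp.length_le (by omega)
    · replace hl : cs.length ≤ ss.length := by omega
      rw [if_neg (by omega)]
      by_cases hc : cs.getD i ' ' = ss.getD i ' '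
      · have hb : (cs.getD i ' ' == ss.getD i ' ') = true := beq_iff_eq.mpr hc
        rw [if_neg (by rw [hb]; simp)]
        exact pvWhileA_eq cs ss (i+1) (by omega) (fun _ => hl)
          (fun j hj => by rcases Nat.lt_succ_iff_lt_or_eq.mp hj with h' | h'
                          · exact hagree j h'
                          · subst h'; exact hc)
      · have hb : (cs.getD i ' ' == ss.getD i ' ') = false := beq_eq_false_iff_ne.mpr hc
        rw [if_pos (by rw [hb]; simp)]
        symm; simp only [decide_eq_false_iff_not]
        intro hp
        apply hc
        have h2 : i < ss.length := lt_of_lt_of_le h hl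
        rw [List.getD_eq_getElem _ _ h, List.getD_eq_getElem _ _ h2]
        exact hp.getElem h
  · rw [if_neg h]
    have hic : i = cs.length := by omega
    symm; simp only [decide_eq_true_eq]
    rw [List.prefix_iff_eq_take]
    rcases Nat.eq_zero_or_pos i with h0 | h0
    · have : cs = [] := by subst h0; exact List.eq_nil_of_length_eq_zero hic.symm
      simp [this]
    · have hls : cs.length ≤ ss.length := hlen (by omega)
      apply List.ext_getElem
      · simp [Nat.min_eq_left hls]
      · intro j hj hj2
        have hjc : j < cs.length := hj
        have hjs : j < ss.length := lt_of_lt_of_le hjc hls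
        have := hagree j (by omega)
        rw [List.getD_eq_getElem _ _ hjc, List.getD_eq_getElem _ _ hjs] at this
        simpa [List.getElem_take] using this
termination_by cs.length - i

-- the slice test char == string[0:len(char)] is the same prefix test, as a Bool
theorem beq_take_eq_decide_prefix (cs s : List Char) :
    (cs == s.take cs.length) = decide (cs <+: s) := by
  by_cases h : cs <+: s
  · rw [beq_iff_eq.mpr (List.prefix_iff_eq_take.mp h), decide_eq_true h]
  · have hne : cs ≠ s.take cs.length := fun he => h (List.prefix_iff_eq_take.mpr he)
    rw [beq_eq_false_iff_ne.mpr hne, decide_eq_false h]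

theorem pvCalcAlphas_spec (cs : List Char) (arr : List (List Char)) :
    pvCalcAlphas cs arr = (arr.filter (fun s => decide (cs <+: s))).map (·.drop cs.length) := by
  unfold pvCalcAlphas
  have hfun : (fun (alphas : List (List Char)) s =>
      if pvWhileA cs s 0 then alphas ++ [s.drop cs.length] else alphas)
      = (fun alphas s => if decide (cs <+: s) then alphas ++ [s.drop cs.length] else alphas) := by
    funext alphas s
    rw [pvWhileA_eq cs s 0 (by omega) (by simp) (by omega)]
  rw [hfun, PySem.List.foldl_append_if (fun s => decide (cs <+: s)) (·.drop cs.length) arr []]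
  simp

theorem pvCalcBetas_spec (cs : List Char) (arr : List (List Char)) :
    pvCalcBetas cs arr = arr.filter (fun s => !decide (cs <+: s)) := by
  unfold pvCalcBetas
  have hfun : (fun (betas : List (List Char)) s =>
      let b := true
      let b := if cs.length > s.length then true else b
      let b := if cs == s.take cs.length then false else b
      if b then betas ++ [s] else betas)
      = (fun betas s => if (!decide (cs <+: s)) then betas ++ [id s] else betas) := by
    funext betas s
    simp only [beq_take_eq_decide_prefix]
    by_cases hp : cs <+: s <;> simp [hp]
  rw [hfun, PySem.List.foldl_append_if (fun s => !decide (cs <+: s)) id arr []]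
  simp

-- B's recursion computes exactly A's two final lists (betas suffixed; alphas suffixed ++ ["epsilon"])
theorem pvGoB_spec (cs dashed : List Char) (rules : List String) :
    pvGoB cs dashed rules
      = (((rules.map (·.toList)).filter (fun s => !decide (cs <+: s))).map
           (fun s => String.ofList (s ++ dashed)),
         ((rules.map (·.toList)).filter (fun s => decide (cs <+: s))).map
           (fun s => String.ofList (s.drop cs.length ++ dashed)) ++ ["epsilon"]) := by
  induction rules with
  | nil => simp [pvGoB]
  | cons r rest ih =>
    simp only [pvGoB, ih, List.map_cons, List.filter_cons]
    by_cases hp : cs <+: r.toList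
    · rw [(PySem.Chars.startswith_iff r.toList cs).mpr hp]
      simp [hp]
    · rw [Bool.eq_false_iff.mpr (fun ht => hp ((PySem.Chars.startswith_iff r.toList cs).mp ht))]
      simp [hp]

-- the emptiness tests agree: alphas = [] iff no rule has cs as a prefix
theorem alphas_empty_iff (cs : List Char) (rules : List String) :
    (((rules.map (·.toList)).filter (fun s => decide (cs <+: s))).map (·.drop cs.length) = [])
      ↔ (rules.any (fun r => PySem.Chars.startswith r.toList cs)) = false := by
  simp only [List.map_eq_nil_iff, List.filter_eq_nil_iff, List.any_eq_false, List.mem_map,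
    decide_eq_true_eq]
  constructor
  · intro h r hr ht
    exact h _ ⟨r, hr, rfl⟩ ((PySem.Chars.startswith_iff r.toList cs).mp ht)
  · rintro h s ⟨r, hr, rfl⟩ hp
    exact h r hr ((PySem.Chars.startswith_iff r.toList cs).mpr hp)

-- ===== VERDICT (by name: the statement is the Claim_ definition above) =====
theorem eliminateImmediateLeftRecursion_spec : Claim_equal_eliminateImmediateLeftRecursion := by
  intro char setOfRules _
  unfold Spec_eliminateImmediateLeftRecursion
  simp only [eliminateImmediateLeftRecursion, eliminateImmediateLeftRecursion_alt,
    pvCalcAlphas_spec, pvCalcBetas_spec, pvGoB_spec]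
  simp only [List.length_eq_zero_iff]
  by_cases hA : ((setOfRules.map (·.toList)).filter
      (fun s => decide (char.toList <+: s))).map (·.drop char.toList.length) = []
  · rw [if_pos hA, if_pos (by rw [(alphas_empty_iff _ _).mp hA]; exact Bool.false_ne_true)]
  · have hany : (setOfRules.any (fun r => PySem.Chars.startswith r.toList char.toList)) = true := by
      cases h : (setOfRules.any (fun r => PySem.Chars.startswith r.toList char.toList))
      · exact absurd ((alphas_empty_iff _ _).mpr h) hA
      · rfl
    rw [if_neg hA, if_neg (by simp [hany])]
    rw [PySem.List.foldl_append_singleton_eq_map, PySem.List.foldl_append_singleton_eq_map]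
    simp [List.map_map, Function.comp]
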